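-- pv_equiv track=rewrite | github.com/yuri-pechatnov/bioi2019 | 4/sol.py | all_changes
-- ===== SOURCE A (Python) =====
-- G = 'ACGT'
--
-- def gen_patches(s, poses):
--     if len(poses) == 0:
--         return [""]
--     patches = gen_patches(s, poses[1:])
--     fp = poses[0]
--     npatches = []
--     for c in G:
--         if c == s[fp]:
--             continue
--         for patch in patches:
--             npatches.append(c + patch)
--     return npatches
--
-- def all_changes(s, poses):
--     changes = []
--     patches = gen_patches(s, poses)
--     cur = [c for c in s]
--     for patch in patches:
--         for pos, ch in zip(poses, patch):
--             cur[pos] = ch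
--         changes.append("".join(cur))
--     return changes
-- ===== SOURCE B (Python) =====
-- G = 'ACGT'
--
-- def all_changes(s, poses):
--     # iterative Cartesian-product of per-position choice lists instead of recursion;
--     # each result built on a fresh copy of s instead of a mutated running buffer
--     choices = [[c for c in G if c != s[p]] for p in poses]
--     combos = [[]]
--     for ch in choices:
--         combos = [combo + [c] for combo in combos for c in ch]
--     out = []
--     for combo in combos:
--         cur = list(s)
--         for p, c in zip(poses, combo):
--             cur[p] = c
--         out.append("".join(cur))
--     return out
-- ===== Notes on version B (the rewrite author's own statement) =====
-- stated objective: alternative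
-- what changed: Replaces the recursive patch generator and the mutated running buffer with an iterative left-to-right Cartesian product of per-position choice lists, applying each combination to a fresh copy of s.
import Mathlib
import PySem

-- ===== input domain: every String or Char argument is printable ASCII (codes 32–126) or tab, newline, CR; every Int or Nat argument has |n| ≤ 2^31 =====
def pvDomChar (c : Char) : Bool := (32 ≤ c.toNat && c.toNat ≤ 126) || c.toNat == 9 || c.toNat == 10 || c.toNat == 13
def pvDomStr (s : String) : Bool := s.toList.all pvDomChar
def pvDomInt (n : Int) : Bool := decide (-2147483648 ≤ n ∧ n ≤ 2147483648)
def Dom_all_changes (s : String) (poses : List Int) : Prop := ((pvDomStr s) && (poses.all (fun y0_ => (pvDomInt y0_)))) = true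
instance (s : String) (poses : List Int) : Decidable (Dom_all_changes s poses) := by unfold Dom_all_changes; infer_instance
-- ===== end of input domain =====

-- B replaces A's recursive patch generator and mutated running buffer by an iterative
-- Cartesian product of per-position choice lists applied to a fresh copy of s (alternative
-- decomposition, same cost).

-- ===== PORT A =====
-- module constant G = 'ACGT'
def pvG : List Char := ['A', 'C', 'G', 'T']

-- literal port of gen_patches; s[fp] is ported as pyGetD with a dummy default: Python raises
-- IndexError on an out-of-range index, excluded by Pre_all_changes below.
def gen_patches (s : List Char) (poses : List Int) : List (List Char) :=
  match poses with
  | [] => [[]]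
  | fp :: rest =>
    let patches := gen_patches s rest
    pvG.foldl (fun npatches c =>
      if c = PySem.List.pyGetD s fp ' ' then npatches
      else patches.foldl (fun npatches patch => npatches ++ [c :: patch]) npatches) []

def all_changes (s : String) (poses : List Int) : List String :=
  let patches := gen_patches s.toList poses
  let cur := s.toList
  (patches.foldl (fun (st : List Char × List String) patch =>
      let cur := (poses.zip patch).foldl (fun cur pc => PySem.List.pySetD cur pc.1 pc.2) st.1
      (cur, st.2 ++ [String.ofList cur])) (cur, [])).2

-- ===== PORT B =====
-- literal port of Source B: choice lists, iterative product, fresh list(s) per combination.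
-- cur[p] = c is ported as pySetD (no-op instead of IndexError, excluded by Pre_all_changes).
def all_changes_alt (s : String) (poses : List Int) : List String :=
  let choices := poses.map (fun p => pvG.filter (fun c => c ≠ PySem.List.pyGetD s.toList p ' '))
  let combos := choices.foldl
      (fun combos ch => combos.flatMap (fun combo => ch.map (fun c => combo ++ [c]))) [[]]
  combos.map (fun combo =>
    let cur := (poses.zip combo).foldl (fun cur pc => PySem.List.pySetD cur pc.1 pc.2) s.toList
    String.ofList cur)

-- ===== PRECONDITION & SPEC =====
-- Pre_ excludes exactly the inputs where Python A raises IndexError: some position out of range.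
def Pre_all_changes (s : String) (poses : List Int) : Prop :=
  ∀ p ∈ poses, PySem.Raise.InRange s.toList.length p
instance (s : String) (poses : List Int) : Decidable (Pre_all_changes s poses) := by
  unfold Pre_all_changes; infer_instance

def pvWitness_all_changes : String × List Int := ("ACG", [1, -1])

def Spec_all_changes (s : String) (poses : List Int) (out : List String) : Prop := out = all_changes_alt s poses
instance (s : String) (poses : List Int) (out : List String) : Decidable (Spec_all_changes s poses out) := by unfold Spec_all_changes; infer_instance

-- ===== CLAIM (what is proved, stated in full; the proofs are below) =====
def Claim_equal_all_changes : Prop := ∀ (s : String) (poses : List Int), Dom_all_changes s poses → Pre_all_changes s poses → Spec_all_changes s poses (all_changes s poses)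

-- ===== LEMMAS AND PROOFS =====

-- the write loop 'for pos, ch in zip(poses, patch): cur[pos] = ch'
def pvApply (ws : List (Int × Char)) (cur : List Char) : List Char :=
  ws.foldl (fun cur pc => PySem.List.pySetD cur pc.1 pc.2) cur

theorem pvApply_cons (pc : Int × Char) (ws : List (Int × Char)) (cur : List Char) :
    pvApply (pc :: ws) cur = pvApply ws (PySem.List.pySetD cur pc.1 pc.2) := rfl

theorem pvApply_length (ws : List (Int × Char)) (cur : List Char) :
    (pvApply ws cur).length = cur.length := by
  induction ws generalizing cur with
  | nil => rfl
  | cons pc t ih => rw [pvApply_cons, ih, PySem.List.length_pySetD]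

theorem pvIdx_lt {len : Nat} {i : Int} {k : Nat} (h : PySem.List.pyIdx? len i = some k) :
    k < len := by
  unfold PySem.List.pyIdx? at h
  split_ifs at h <;> simp_all <;> omega

theorem pySetD_getD (cur : List Char) (p : Int) (c : Char) (n : Nat) :
    (PySem.List.pySetD cur p c).getD n ' ' =
      if PySem.List.pyIdx? cur.length p = some n then c else cur.getD n ' ' := by
  unfold PySem.List.pySetD PySem.List.pySet?
  cases h : PySem.List.pyIdx? cur.length p with
  | none => simp
  | some k =>
    have hk := pvIdx_lt h
    simp only [Option.map_some, Option.getD_some]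
    by_cases hnk : k = n
    · subst hnk; simp [List.getD_eq_getElem?_getD, hk]
    · simp [List.getD_eq_getElem?_getD, hnk]

theorem pvApply_getD (ws : List (Int × Char)) (cur : List Char) (n : Nat) :
    (pvApply ws cur).getD n ' ' =
      match ws.reverse.find? (fun pc => PySem.List.pyIdx? cur.length pc.1 == some n) with
      | some pc => pc.2
      | none => cur.getD n ' ' := by
  induction ws generalizing cur with
  | nil => simp [pvApply]
  | cons pc t ih =>
    rw [pvApply_cons, ih]
    have hlen : (PySem.List.pySetD cur pc.1 pc.2).length = cur.length :=
      PySem.List.length_pySetD _ _ _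
    rw [hlen]
    simp only [List.reverse_cons, List.find?_append]
    cases hf : t.reverse.find? (fun pc => PySem.List.pyIdx? cur.length pc.1 == some n) with
    | some q => simp
    | none =>
      simp only [Option.none_or, List.find?]
      rw [pySetD_getD]
      cases hb : (PySem.List.pyIdx? cur.length pc.1 == some n) with
      | true => rw [if_pos (by simpa using hb)]
      | false => rw [if_neg (by simpa using hb)]

theorem pvGetElem?_eq_some_getD {l : List Char} {n : Nat} (h : n < l.length) :
    l[n]? = some (l.getD n ' ') := by
  simp [List.getD_eq_getElem?_getD, List.getElem?_eq_getElem h]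

theorem pvApply_overwrite (ps qs : List (Int × Char)) (cur : List Char)
    (h : ps.map Prod.fst = qs.map Prod.fst) :
    pvApply ps (pvApply qs cur) = pvApply ps cur := by
  apply List.ext_getElem?
  intro n
  by_cases hn : n < cur.length
  · have h1 : n < (pvApply ps (pvApply qs cur)).length := by
      rw [pvApply_length, pvApply_length]; exact hn
    have h2 : n < (pvApply ps cur).length := by rw [pvApply_length]; exact hn
    rw [pvGetElem?_eq_some_getD h1, pvGetElem?_eq_some_getD h2]
    have hq : (pvApply qs cur).length = cur.length := pvApply_length _ _
    rw [pvApply_getD ps (pvApply qs cur) n, pvApply_getD ps cur n, hq]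
    cases hf : ps.reverse.find? (fun pc => PySem.List.pyIdx? cur.length pc.1 == some n) with
    | some q => rfl
    | none =>
      simp only
      rw [pvApply_getD qs cur n]
      cases hg : qs.reverse.find? (fun pc => PySem.List.pyIdx? cur.length pc.1 == some n) with
      | some q =>
        exfalso
        have hmemq : q ∈ qs := List.mem_reverse.mp (List.mem_of_find?_eq_some hg)
        have hpred : PySem.List.pyIdx? cur.length q.1 = some n := by
          have h1 := List.find?_some
            (p := fun pc : Int × Char => PySem.List.pyIdx? cur.length pc.1 == some n) hg
          simpa using h1
        have hfst : q.1 ∈ ps.map Prod.fst := by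
          rw [h]; exact List.mem_map.mpr ⟨q, hmemq, rfl⟩
        obtain ⟨r, hr, hre⟩ := List.mem_map.mp hfst
        have h2 := List.find?_eq_none.mp hf r (List.mem_reverse.mpr hr)
        simp [hre, hpred] at h2
      | none => rfl
  · have h1 : (pvApply ps (pvApply qs cur)).length ≤ n := by
      rw [pvApply_length, pvApply_length]; omega
    have h2 : (pvApply ps cur).length ≤ n := by rw [pvApply_length]; omega
    rw [List.getElem?_eq_none h1, List.getElem?_eq_none h2]

-- loop shapes of gen_patches
theorem pvFoldl_append_singleton {α β : Type} (f : α → β) :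
    ∀ (l : List α) (acc : List β), l.foldl (fun a x => a ++ [f x]) acc = acc ++ l.map f := by
  intro l
  induction l with
  | nil => simp
  | cons x t ih => intro acc; simp [ih]

theorem pvFoldl_if_flatMap {α β : Type} (P : α → Prop) [DecidablePred P] (f : α → List β) :
    ∀ (l : List α) (acc : List β),
      l.foldl (fun a c => if P c then a else a ++ f c) acc
        = acc ++ (l.filter (fun c => !(decide (P c)))).flatMap f := by
  intro l
  induction l with
  | nil => simp
  | cons x t ih =>
    intro acc
    by_cases hx : P x
    · simp [hx, ih]
    · simp [hx, ih]

theorem gen_patches_cons (s : List Char) (fp : Int) (rest : List Int) :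
    gen_patches s (fp :: rest) =
      (pvG.filter (fun c => c ≠ PySem.List.pyGetD s fp ' ')).flatMap
        (fun c => (gen_patches s rest).map (fun p => c :: p)) := by
  show pvG.foldl (fun npatches c =>
      if c = PySem.List.pyGetD s fp ' ' then npatches
      else (gen_patches s rest).foldl (fun npatches patch => npatches ++ [c :: patch]) npatches) []
    = _
  have hb : ∀ (acc : List (List Char)) (c : Char),
      (gen_patches s rest).foldl (fun npatches patch => npatches ++ [c :: patch]) acc
        = acc ++ (gen_patches s rest).map (fun p => c :: p) := by
    intro acc c; exact pvFoldl_append_singleton _ _ _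
  calc pvG.foldl (fun npatches c =>
        if c = PySem.List.pyGetD s fp ' ' then npatches
        else (gen_patches s rest).foldl (fun npatches patch => npatches ++ [c :: patch]) npatches) []
      = pvG.foldl (fun npatches c =>
        if c = PySem.List.pyGetD s fp ' ' then npatches
        else npatches ++ (gen_patches s rest).map (fun p => c :: p)) [] := by
        apply List.foldl_ext
        intro acc c _
        by_cases hc : c = PySem.List.pyGetD s fp ' ' <;> simp [hc, hb]
    _ = _ := by
        rw [pvFoldl_if_flatMap (fun c => c = PySem.List.pyGetD s fp ' ')
          (fun c => (gen_patches s rest).map (fun p => c :: p)) pvG []]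
        simp [decide_not]

theorem gen_patches_len (s : List Char) :
    ∀ (poses : List Int), ∀ p ∈ gen_patches s poses, p.length = poses.length := by
  intro poses
  induction poses with
  | nil =>
    intro p hp
    simp [gen_patches] at hp
    simp [hp]
  | cons fp rest ih =>
    intro p hp
    rw [gen_patches_cons] at hp
    obtain ⟨c, _, q, hq, rfl⟩ := by
      simpa [List.mem_flatMap, List.mem_map] using hp
    simp [ih q hq]

theorem pvCombos_eq (s : List Char) :
    ∀ (poses : List Int) (acc : List (List Char)),
      (poses.map (fun p => pvG.filter (fun c => c ≠ PySem.List.pyGetD s p ' '))).foldl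
          (fun combos ch => combos.flatMap (fun combo => ch.map (fun c => combo ++ [c]))) acc
        = acc.flatMap (fun pre => (gen_patches s poses).map (fun p => pre ++ p)) := by
  intro poses
  induction poses with
  | nil => intro acc; simp [gen_patches]
  | cons fp rest ih =>
    intro acc
    simp only [List.map_cons, List.foldl_cons]
    rw [ih]
    rw [gen_patches_cons]
    simp [List.flatMap_assoc, List.flatMap_map, List.map_flatMap, List.map_map,
      Function.comp_def, List.append_assoc]

theorem pvLoopA (s0 : List Char) (poses : List Int) :
    ∀ (patches : List (List Char)) (cur : List Char) (acc : List String),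
      (∀ p ∈ patches, p.length = poses.length) →
      (∀ q : List Char, q.length = poses.length →
          pvApply (poses.zip q) cur = pvApply (poses.zip q) s0) →
      (patches.foldl (fun (st : List Char × List String) patch =>
          let cur := (poses.zip patch).foldl (fun cur pc => PySem.List.pySetD cur pc.1 pc.2) st.1
          (cur, st.2 ++ [String.ofList cur])) (cur, acc)).2
        = acc ++ patches.map (fun p => String.ofList (pvApply (poses.zip p) s0)) := by
  intro patches
  induction patches with
  | nil => intro cur acc _ _; simp
  | cons p t ih =>
    intro cur acc hlen hinv
    simp only [List.foldl_cons, List.map_cons]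
    have hp : p.length = poses.length := hlen p (by simp)
    have hcur : (poses.zip p).foldl (fun cur pc => PySem.List.pySetD cur pc.1 pc.2) cur
        = pvApply (poses.zip p) s0 := hinv p hp
    rw [hcur]
    rw [ih (pvApply (poses.zip p) s0) (acc ++ [String.ofList (pvApply (poses.zip p) s0)])
      (fun q hq => hlen q (by simp [hq]))
      (fun q hq => by
        have hfst : ((poses.zip q).map Prod.fst) = ((poses.zip p).map Prod.fst) := by
          rw [List.map_fst_zip (by omega : poses.length ≤ q.length), List.map_fst_zip (by omega : poses.length ≤ p.length)]
        exact pvApply_overwrite (poses.zip q) (poses.zip p) s0 hfst)]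
    simp

-- ===== VERDICT (by name: the statement is the Claim_ definition above) =====
theorem all_changes_spec : Claim_equal_all_changes := by
  intro s poses _ _
  unfold Spec_all_changes all_changes all_changes_alt
  simp only
  rw [pvLoopA s.toList poses (gen_patches s.toList poses) s.toList []
    (gen_patches_len s.toList poses) (fun q _ => rfl)]
  rw [pvCombos_eq s.toList poses [[]]]
  simp [pvApply]
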